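-- pv_equiv track=rewrite | github.com/IKdotShark/Uir_2023 | lab2/arrays.py | zmeika_2nx2n
-- ===== SOURCE A (Python) =====
-- def zmeika_2nx2n(n, arr2):
--     arr3 = [0] * n * 2
--     for i in range(n * 2):
--         arr3[i] = [0] * n * 2
--     for i in range(n):
--         for j in range(n * 2):
--             arr3[i][j] = arr2[i][j]
--     for i in range(n * 2):
--         for j in range(n * 2):
--             arr3[n * 2 - i - 1][j] = arr3[i][j]
--     return arr3
-- ===== SOURCE B (Python) =====
-- def zmeika_2nx2n(n, arr2):
--     m = 2 * n
--     return [[arr2[min(k, m - 1 - k)][j] for j in range(m)] for k in range(m)]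
-- ===== Notes on version B (the rewrite author's own statement) =====
-- stated objective: simpler
-- what changed: A allocates a zero 2n x 2n matrix and runs three in-place index-assignment loops (fill, copy, self-overwriting mirror); B never builds halves or mutates anything: it emits each of the 2n output rows directly via the closed-form symmetric index map row(k) = arr2[min(k, 2n-1-k)].
import Mathlib
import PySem

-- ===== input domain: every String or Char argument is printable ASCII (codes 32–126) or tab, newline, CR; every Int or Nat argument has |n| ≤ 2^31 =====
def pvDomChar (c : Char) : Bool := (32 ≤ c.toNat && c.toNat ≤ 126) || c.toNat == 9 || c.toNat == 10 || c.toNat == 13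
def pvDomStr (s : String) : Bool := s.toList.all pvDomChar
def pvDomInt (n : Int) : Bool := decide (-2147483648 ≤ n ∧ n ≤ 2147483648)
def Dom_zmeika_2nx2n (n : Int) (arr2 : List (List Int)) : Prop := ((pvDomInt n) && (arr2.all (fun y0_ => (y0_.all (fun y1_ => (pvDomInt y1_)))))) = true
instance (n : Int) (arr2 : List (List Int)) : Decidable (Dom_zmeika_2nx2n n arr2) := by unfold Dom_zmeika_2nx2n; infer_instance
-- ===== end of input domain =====

-- B replaces A's three in-place mutation loops by emitting each output row directly via the
-- symmetric index map k ↦ min(k, 2n-1-k) (objective: simpler); equivalence is about the returned value.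

-- ===== PORT A =====
-- arr3 = [0]*n*2 then arr3[i] = [0]*n*2 for i in range(n*2): the int placeholders are
-- modelled as [] rows (they are all overwritten by the first loop before being read).
def zmeika_2nx2n (n : Int) (arr2 : List (List Int)) : List (List Int) :=
  let arr3 : List (List Int) := List.replicate (n * 2).toNat []
  -- for i in range(n*2): arr3[i] = [0]*n*2
  let arr3 := (PySem.List.pyRange 0 (n * 2) 1).foldl
      (fun a i => a.set i.toNat (List.replicate (n * 2).toNat 0)) arr3
  -- for i in range(n): for j in range(n*2): arr3[i][j] = arr2[i][j]
  let arr3 := (PySem.List.pyRange 0 n 1).foldl (fun a i =>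
      (PySem.List.pyRange 0 (n * 2) 1).foldl (fun a j =>
        a.set i.toNat ((a.getD i.toNat []).set j.toNat
          (PySem.List.pyGetD (PySem.List.pyGetD arr2 i []) j 0))) a) arr3
  -- for i in range(n*2): for j in range(n*2): arr3[n*2-i-1][j] = arr3[i][j]
  let arr3 := (PySem.List.pyRange 0 (n * 2) 1).foldl (fun a i =>
      (PySem.List.pyRange 0 (n * 2) 1).foldl (fun a j =>
        a.set (n * 2 - i - 1).toNat ((a.getD (n * 2 - i - 1).toNat []).set j.toNat
          ((a.getD i.toNat []).getD j.toNat 0))) a) arr3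
  arr3

-- ===== PORT B =====
-- m = 2*n; return [[arr2[min(k, m-1-k)][j] for j in range(m)] for k in range(m)]
def zmeika_2nx2n_alt (n : Int) (arr2 : List (List Int)) : List (List Int) :=
  let m := 2 * n
  (PySem.List.pyRange 0 m 1).map (fun k =>
    (PySem.List.pyRange 0 m 1).map (fun j =>
      PySem.List.pyGetD (PySem.List.pyGetD arr2 (min k (m - 1 - k)) []) j 0))

-- ===== PRECONDITION & SPEC =====
-- Pre_ excludes exactly the inputs where Python A raises IndexError reading arr2[i][j]
-- (fewer than n rows, or one of the first n rows shorter than n*2); B raises there too.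
def Pre_zmeika_2nx2n (n : Int) (arr2 : List (List Int)) : Prop :=
  n.toNat ≤ arr2.length ∧ ∀ row ∈ arr2.take n.toNat, (n * 2).toNat ≤ row.length
instance (n : Int) (arr2 : List (List Int)) : Decidable (Pre_zmeika_2nx2n n arr2) := by
  unfold Pre_zmeika_2nx2n; infer_instance
def pvWitness_zmeika_2nx2n : Int × List (List Int) := (1, [[1, 2], [3, 4]])
def Spec_zmeika_2nx2n (n : Int) (arr2 : List (List Int)) (out : List (List Int)) : Prop := out = zmeika_2nx2n_alt n arr2
instance (n : Int) (arr2 : List (List Int)) (out : List (List Int)) : Decidable (Spec_zmeika_2nx2n n arr2 out) := by unfold Spec_zmeika_2nx2n; infer_instance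

-- ===== CLAIM (what is proved, stated in full; the proofs are below) =====
def Claim_equal_zmeika_2nx2n : Prop := ∀ (n : Int) (arr2 : List (List Int)), Dom_zmeika_2nx2n n arr2 → Pre_zmeika_2nx2n n arr2 → Spec_zmeika_2nx2n n arr2 (zmeika_2nx2n n arr2)

-- ===== LEMMAS AND PROOFS =====
theorem pv_getD_set_self {α : Type} (l : List α) (i : ℕ) (x d : α) (h : i < l.length) :
    (l.set i x).getD i d = x := by
  simp [List.getD_eq_getElem?_getD, h]

theorem pv_getD_set_ne {α : Type} (l : List α) (t i : ℕ) (x d : α) (h : t ≠ i) :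
    (l.set t x).getD i d = l.getD i d := by
  simp [List.getD_eq_getElem?_getD, List.getElem?_set_ne h]

theorem pv_getD_eq_getElem {α : Type} (l : List α) (i : ℕ) (d : α) (h : i < l.length) :
    l.getD i d = l[i] := by
  simp [List.getD_eq_getElem?_getD, List.getElem?_eq_getElem h]

theorem pv_set_getD_self {α : Type} (l : List α) (i : ℕ) (d : α) (h : i < l.length) :
    l.set i (l.getD i d) = l := by
  rw [pv_getD_eq_getElem l i d h]
  exact List.set_getElem_self h

theorem pv_getD_append_left {α : Type} (xs ys : List α) (j : ℕ) (d : α) (h : j < xs.length) :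
    (xs ++ ys).getD j d = xs.getD j d := by
  simp [List.getD_eq_getElem?_getD, List.getElem?_append_left h]

theorem pv_getD_append_right {α : Type} (xs ys : List α) (j : ℕ) (d : α) (h : xs.length ≤ j) :
    (xs ++ ys).getD j d = ys.getD (j - xs.length) d := by
  simp [List.getD_eq_getElem?_getD, List.getElem?_append_right h]

theorem pv_set_append_right {α : Type} (xs ys : List α) (j : ℕ) (v : α) (h : xs.length ≤ j) :
    (xs ++ ys).set j v = xs ++ ys.set (j - xs.length) v := by
  simp [List.set_append, Nat.not_lt.mpr h]

theorem pv_drop_getD {α : Type} (a : List α) (k : ℕ) (d : α) :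
    (a.drop k).getD 0 d = a.getD k d := by
  simp [List.getD_eq_getElem?_getD, List.getElem?_drop]

theorem pv_foldl_set_read {α : Type} (d : α) (F : ℕ → α → α) :
    ∀ (k : ℕ) (a : List α), k ≤ a.length →
      (List.range k).foldl (fun acc i => acc.set i (F i (acc.getD i d))) a
        = (List.range k).map (fun i => F i (a.getD i d)) ++ a.drop k := by
  intro k
  induction k with
  | zero => simp
  | succ k ih =>
    intro a hk
    rw [List.range_succ, List.foldl_append, List.map_append, ih a (by omega)]
    simp only [List.foldl_cons, List.foldl_nil, List.map_cons, List.map_nil]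
    have hlen : ((List.range k).map (fun i => F i (a.getD i d))).length = k := by simp
    have hget : (((List.range k).map (fun i => F i (a.getD i d))) ++ a.drop k).getD k d
        = a.getD k d := by
      rw [pv_getD_append_right _ _ _ _ (by omega), hlen]
      simpa using pv_drop_getD a k d
    rw [hget, pv_set_append_right _ _ _ _ (by omega), hlen]
    have hd : List.drop k a = a[k] :: List.drop (k+1) a := List.drop_eq_getElem_cons (by omega)
    rw [hd, Nat.sub_self, List.set_cons_zero, pv_getD_eq_getElem a k d (by omega)]
    simp

theorem pv_map_getD_range {α : Type} (d : α) (l : List α) :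
    (List.range l.length).map (fun i => l.getD i d) = l := by
  apply List.ext_getElem (by simp)
  intro k h1 h2
  simp [List.getElem?_eq_getElem h2]

theorem pv_map_const_range {α : Type} (v : α) (k : ℕ) :
    (List.range k).map (fun _ => v) = List.replicate k v := by
  induction k with
  | zero => simp
  | succ k ih => rw [List.range_succ, List.map_append, ih, List.replicate_succ']; simp

theorem pv_foldl_id {α β : Type} (f : α → β → α) (l : List β) (a : α)
    (h : ∀ x ∈ l, f a x = a) : l.foldl f a = a := by
  induction l with
  | nil => rfl
  | cons x xs ih => rw [List.foldl_cons, h x (by simp)]; exact ih (fun y hy => h y (by simp [hy]))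

theorem pv_set_replicate_last {α : Type} (z v : α) (m : ℕ) :
    (List.replicate (m + 1) z).set m v = List.replicate m z ++ [v] := by
  induction m with
  | zero => rfl
  | succ m ih => rw [List.replicate_succ, List.set_cons_succ, ih, List.replicate_succ]; simp

theorem pv_inner_row {α : Type} (t : ℕ) (g : ℕ → α) :
    ∀ (js : List ℕ) (a : List (List α)), t < a.length →
      js.foldl (fun a j => a.set t ((a.getD t []).set j (g j))) a
        = a.set t (js.foldl (fun r j => r.set j (g j)) (a.getD t [])) := by
  intro js
  induction js with
  | nil => intro a ha; rw [List.foldl_nil, List.foldl_nil, pv_set_getD_self a t [] ha]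
  | cons j js ih =>
    intro a ha
    rw [List.foldl_cons, ih _ (by simpa using ha),
        pv_getD_set_self a t _ [] ha, List.set_set, List.foldl_cons]

theorem pv_inner_mirror {α : Type} (z : α) (t i : ℕ) (hne : t ≠ i) :
    ∀ (js : List ℕ) (a : List (List α)), t < a.length →
      js.foldl (fun a j => a.set t ((a.getD t []).set j ((a.getD i []).getD j z))) a
        = a.set t (js.foldl (fun r j => r.set j ((a.getD i []).getD j z)) (a.getD t [])) := by
  intro js
  induction js with
  | nil => intro a ha; rw [List.foldl_nil, List.foldl_nil, pv_set_getD_self a t [] ha]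
  | cons j js ih =>
    intro a ha
    rw [List.foldl_cons, ih _ (by simpa using ha),
        pv_getD_set_self a t _ [] ha, pv_getD_set_ne a t i _ [] hne, List.set_set, List.foldl_cons]

theorem pv_foldl_set_const {α : Type} (d : α) (gg : ℕ → α) (k : ℕ) (a : List α) (h : k ≤ a.length) :
    (List.range k).foldl (fun acc i => acc.set i (gg i)) a = (List.range k).map gg ++ a.drop k := by
  simpa using pv_foldl_set_read d (fun i _ => gg i) k a h

theorem pv_stage2 (g : ℕ → ℕ → Int) (M : ℕ) :
    ∀ (k : ℕ) (a : List (List Int)), k ≤ a.length → (∀ r ∈ a, r.length = M) →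
      (List.range k).foldl (fun a i => (List.range M).foldl
          (fun a j => a.set i ((a.getD i []).set j (g i j))) a) a
        = (List.range k).map (fun i => (List.range M).map (g i)) ++ a.drop k := by
  intro k
  induction k with
  | zero => simp
  | succ k ih =>
    intro a hk hr
    rw [List.range_succ, List.foldl_append, ih a (by omega) hr, List.map_append]
    simp only [List.foldl_cons, List.foldl_nil, List.map_cons, List.map_nil]
    have hml : (List.map (fun i => (List.range M).map (g i)) (List.range k)).length = k := by simp
    have hblen : (List.map (fun i => (List.range M).map (g i)) (List.range k) ++ a.drop k).length
        = a.length := by simp; omega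
    rw [pv_inner_row k (g k) (List.range M) _ (by omega)]
    have hbk : (List.map (fun i => (List.range M).map (g i)) (List.range k) ++ a.drop k).getD k []
        = a.getD k [] := by
      rw [pv_getD_append_right _ _ _ _ (by omega), hml, Nat.sub_self, pv_drop_getD]
    rw [hbk]
    have hrowlen : (a.getD k []).length = M := by
      rw [pv_getD_eq_getElem a k [] (by omega)]
      exact hr _ (List.getElem_mem _)
    rw [pv_foldl_set_const (0 : Int) (fun j => g k j) M (a.getD k []) (by omega)]
    rw [show (a.getD k []).drop M = [] from by rw [← hrowlen]; exact List.drop_length]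
    rw [pv_set_append_right _ _ _ _ (by omega), hml, Nat.sub_self]
    have hd : List.drop k a = a[k] :: List.drop (k+1) a := List.drop_eq_getElem_cons (by omega)
    rw [hd, List.set_cons_zero]
    simp

theorem pv_mirror_step (t i M : ℕ) (hne : t ≠ i) (a : List (List Int))
    (ht : t < a.length) (hri : (a.getD i []).length = M) (hrt : (a.getD t []).length = M) :
    (List.range M).foldl (fun a j => a.set t ((a.getD t []).set j ((a.getD i []).getD j 0))) a
      = a.set t (a.getD i []) := by
  rw [pv_inner_mirror (0:Int) t i hne (List.range M) a ht]
  rw [pv_foldl_set_const (0 : Int) (fun j => (a.getD i []).getD j 0) M (a.getD t []) (by omega)]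
  rw [show (a.getD t []).drop M = [] from by rw [← hrt]; exact List.drop_length]
  rw [show M = (a.getD i []).length from hri.symm, pv_map_getD_range]
  simp

theorem pv_stage3a (N M : ℕ) (hM : M = N + N) (top : List (List Int))
    (htl : top.length = N) (hrows : ∀ r ∈ top, r.length = M) :
    ∀ k, k ≤ N →
      (List.range k).foldl (fun a i => (List.range M).foldl
          (fun a j => a.set (M - 1 - i) ((a.getD (M - 1 - i) []).set j ((a.getD i []).getD j 0))) a)
          (top ++ List.replicate N (List.replicate M (0:Int)))
        = top ++ List.replicate (N - k) (List.replicate M (0:Int)) ++ (top.take k).reverse := by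
  intro k
  induction k with
  | zero => simp
  | succ k ih =>
    intro hk
    rw [List.range_succ, List.foldl_append, ih (by omega)]
    simp only [List.foldl_cons, List.foldl_nil]
    set b := top ++ List.replicate (N - k) (List.replicate M (0:Int)) ++ (top.take k).reverse with hb
    have hrevlen : ((top.take k).reverse).length = k := by simp; omega
    have hblen : b.length = M := by simp [hb]; omega
    have hgk : b.getD k [] = top.getD k [] := by
      rw [hb, List.append_assoc, pv_getD_append_left _ _ _ _ (by omega)]
    have hgt : b.getD (M - 1 - k) [] = List.replicate M (0:Int) := by
      rw [hb, List.append_assoc, pv_getD_append_right _ _ _ _ (by omega), htl]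
      rw [pv_getD_append_left _ _ _ _ (by simp; omega)]
      rw [pv_getD_eq_getElem _ _ _ (by simp; omega), List.getElem_replicate]
    rw [pv_mirror_step (M - 1 - k) k M (by omega) b (by omega)
        (by rw [hgk, pv_getD_eq_getElem _ _ _ (by omega)]; exact hrows _ (List.getElem_mem _))
        (by rw [hgt]; simp)]
    rw [hgk, hb, List.append_assoc, pv_set_append_right _ _ _ _ (by omega), htl]
    rw [List.set_append_left _ _ (by simp; omega)]
    rw [show M - 1 - k - N = N - 1 - k from by omega]
    have hrep : N - k = (N - 1 - k) + 1 := by omega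
    rw [hrep, pv_set_replicate_last]
    have htake : (top.take (k+1)).reverse = top.getD k [] :: (top.take k).reverse := by
      rw [List.take_succ]
      have : top[k]? = some top[k] := List.getElem?_eq_getElem (by omega)
      rw [this, pv_getD_eq_getElem _ _ _ (by omega)]
      simp
    rw [htake, show N - (k+1) = N - 1 - k from by omega]
    simp

theorem pv_stage3b (N M : ℕ) (hM : M = N + N) (top : List (List Int))
    (htl : top.length = N) (hrows : ∀ r ∈ top, r.length = M) :
    ((List.range N).map (fun r => N + r)).foldl (fun a i => (List.range M).foldl
        (fun a j => a.set (M - 1 - i) ((a.getD (M - 1 - i) []).set j ((a.getD i []).getD j 0))) a)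
        (top ++ top.reverse)
      = top ++ top.reverse := by
  apply pv_foldl_id
  intro x hx
  simp only [List.mem_map, List.mem_range] at hx
  obtain ⟨r, hr, rfl⟩ := hx
  have hlen : (top ++ top.reverse).length = M := by simp; omega
  have hgs : (top ++ top.reverse).getD (N + r) [] = top.getD (N - 1 - r) [] := by
    rw [pv_getD_append_right _ _ _ _ (by omega), htl, show N + r - N = r from by omega]
    rw [pv_getD_eq_getElem _ _ _ (by simp; omega), List.getElem_reverse]
    rw [pv_getD_eq_getElem _ _ _ (by omega)]
    congr 1; omega
  have hgt : (top ++ top.reverse).getD (M - 1 - (N + r)) [] = top.getD (N - 1 - r) [] := by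
    rw [pv_getD_append_left _ _ _ _ (by omega), show M - 1 - (N + r) = N - 1 - r from by omega]
  rw [pv_mirror_step (M - 1 - (N + r)) (N + r) M (by omega) _ (by omega)
      (by rw [hgs, pv_getD_eq_getElem _ _ _ (by omega)]; exact hrows _ (List.getElem_mem _))
      (by rw [hgt, pv_getD_eq_getElem _ _ _ (by omega)]; exact hrows _ (List.getElem_mem _))]
  rw [hgs, ← hgt]
  exact pv_set_getD_self _ _ _ (by omega)

theorem pv_stage3 (N M : ℕ) (hM : M = N + N) (top : List (List Int))
    (htl : top.length = N) (hrows : ∀ r ∈ top, r.length = M) :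
    (List.range M).foldl (fun a i => (List.range M).foldl
        (fun a j => a.set (M - 1 - i) ((a.getD (M - 1 - i) []).set j ((a.getD i []).getD j 0))) a)
        (top ++ List.replicate N (List.replicate M (0:Int)))
      = top ++ top.reverse := by
  subst hM
  rw [List.range_add, List.foldl_append]
  simp only [← List.range_add]
  rw [pv_stage3a N (N+N) rfl top htl hrows N le_rfl]
  rw [show N - N = 0 from by omega, List.replicate_zero, List.append_nil,
    show top.take N = top from by rw [← htl]; exact List.take_length]
  exact pv_stage3b N (N+N) rfl top htl hrows

-- A equals "top half ++ its reverse" with the top half written as an explicit map.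
theorem pv_A_eq_mirror (n : Int) (arr2 : List (List Int)) (hn : 0 < n) :
    zmeika_2nx2n n arr2
      = ((List.range n.toNat).map (fun (i : ℕ) => (List.range (n*2).toNat).map
          (fun (j : ℕ) => PySem.List.pyGetD (PySem.List.pyGetD arr2 (↑i) []) (↑j) 0)))
        ++ ((List.range n.toNat).map (fun (i : ℕ) => (List.range (n*2).toNat).map
          (fun (j : ℕ) => PySem.List.pyGetD (PySem.List.pyGetD arr2 (↑i) []) (↑j) 0))).reverse := by
  simp only [zmeika_2nx2n, PySem.List.pyRange_one, zero_add, sub_zero,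
    List.foldl_map, Int.toNat_natCast]
  rw [pv_foldl_set_const ([] : List Int) (fun _ => List.replicate (n*2).toNat (0:Int))
      ((n*2).toNat) (List.replicate (n*2).toNat []) (by simp), pv_map_const_range]
  rw [show (List.replicate (n*2).toNat ([] : List Int)).drop (n*2).toNat = [] from by simp,
    List.append_nil]
  rw [pv_stage2 (fun i j => PySem.List.pyGetD (PySem.List.pyGetD arr2 (↑i) []) (↑j) 0)
      ((n*2).toNat) n.toNat (List.replicate (n*2).toNat (List.replicate (n*2).toNat 0))
      (by simp; omega) (fun r hr => by rw [List.eq_of_mem_replicate hr]; simp)]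
  rw [List.drop_replicate, show (n*2).toNat - n.toNat = n.toNat from by omega]
  have hstep : ∀ (acc : List (List Int)) (x : ℕ), x ∈ List.range (n*2).toNat →
      (List.range (n*2).toNat).foldl (fun a j => a.set (n*2 - (x:Int) - 1).toNat
        ((a.getD (n*2 - (x:Int) - 1).toNat []).set j ((a.getD x []).getD j 0))) acc
      = (List.range (n*2).toNat).foldl (fun a j => a.set ((n*2).toNat - 1 - x)
        ((a.getD ((n*2).toNat - 1 - x) []).set j ((a.getD x []).getD j 0))) acc := by
    intro acc x hx
    rw [show ((n*2) - (x:Int) - 1).toNat = (n*2).toNat - 1 - x from by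
      have := List.mem_range.mp hx; omega]
  rw [PySem.List.foldl_congr_mem (List.range (n*2).toNat)
      (fun (acc : List (List Int)) (x : ℕ) => (List.range (n*2).toNat).foldl
        (fun (a : List (List Int)) (j : ℕ) => a.set (n*2 - (x:Int) - 1).toNat
        ((a.getD (n*2 - (x:Int) - 1).toNat []).set j ((a.getD x []).getD j 0))) acc)
      (fun (acc : List (List Int)) (x : ℕ) => (List.range (n*2).toNat).foldl
        (fun (a : List (List Int)) (j : ℕ) => a.set ((n*2).toNat - 1 - x)
        ((a.getD ((n*2).toNat - 1 - x) []).set j ((a.getD x []).getD j 0))) acc)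
      _ hstep]
  exact pv_stage3 n.toNat ((n*2).toNat) (by omega) _
    (by simp)
    (fun r hr => by obtain ⟨i, _, rfl⟩ := List.mem_map.mp hr; simp)

-- B's symmetric-index rows k ↦ f(min(k, 2N-1-k)) split into the first half followed by its reverse.
theorem pv_alt_split {α : Type} (N : ℕ) (f : Int → α) :
    (List.range (N+N)).map (fun (k : ℕ) => f (min ((k : Int)) ((N:Int) + (N:Int) - 1 - (k : Int))))
      = (List.range N).map (fun (i : ℕ) => f ((i : Int))) ++ ((List.range N).map (fun (i : ℕ) => f ((i : Int)))).reverse := by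
  apply List.ext_getElem (by simp)
  intro k h1 h2
  simp only [List.getElem_map, List.getElem_range] at h1 ⊢
  by_cases hk : k < N
  · rw [min_eq_left (by omega)]
    rw [List.getElem_append_left (by simpa using hk)]
    simp
  · have hkM : k < N + N := by simpa using h1
    rw [min_eq_right (by omega)]
    rw [List.getElem_append_right (by simp; omega)]
    rw [List.getElem_reverse, List.getElem_map, List.getElem_range]
    congr 1
    simp only [List.length_map, List.length_range]
    omega

-- B equals the same "top half ++ its reverse".
theorem pv_alt_eq_mirror (n : Int) (arr2 : List (List Int)) (hn : 0 < n) :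
    zmeika_2nx2n_alt n arr2
      = ((List.range n.toNat).map (fun (i : ℕ) => (List.range (n*2).toNat).map
          (fun (j : ℕ) => PySem.List.pyGetD (PySem.List.pyGetD arr2 (↑i) []) (↑j) 0)))
        ++ ((List.range n.toNat).map (fun (i : ℕ) => (List.range (n*2).toNat).map
          (fun (j : ℕ) => PySem.List.pyGetD (PySem.List.pyGetD arr2 (↑i) []) (↑j) 0))).reverse := by
  have h2n : (2:Int) * n = n * 2 := mul_comm 2 n
  have hMN : (n*2).toNat = n.toNat + n.toNat := by omega
  have hnN : (n*2 : Int) = (n.toNat : Int) + (n.toNat : Int) := by omega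
  simp only [zmeika_2nx2n_alt, h2n, PySem.List.pyRange_one, zero_add, sub_zero, List.map_map,
    Function.comp_def]
  rw [hMN, hnN]
  exact pv_alt_split n.toNat
    (fun t => List.map
      (fun (j : ℕ) => PySem.List.pyGetD (PySem.List.pyGetD arr2 t []) ((j : Int)) 0)
      (List.range (n.toNat + n.toNat)))

theorem pv_main (n : Int) (arr2 : List (List Int)) :
    zmeika_2nx2n n arr2 = zmeika_2nx2n_alt n arr2 := by
  by_cases hn : n ≤ 0
  · have h1 : (n*2).toNat = 0 := by omega
    have h2 : PySem.List.pyRange 0 (n*2) 1 = [] := PySem.List.pyRange_one_eq_nil (by omega)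
    have h2' : PySem.List.pyRange 0 (2*n) 1 = [] := PySem.List.pyRange_one_eq_nil (by omega)
    have h3 : PySem.List.pyRange 0 n 1 = [] := PySem.List.pyRange_one_eq_nil (by omega)
    simp [zmeika_2nx2n, zmeika_2nx2n_alt, h1, h2, h2', h3]
  · rw [Int.not_le] at hn
    rw [pv_A_eq_mirror n arr2 hn, pv_alt_eq_mirror n arr2 hn]

-- ===== VERDICT (by name: the statement is the Claim_ definition above) =====
theorem zmeika_2nx2n_spec : Claim_equal_zmeika_2nx2n := by
  intro n arr2 _ _
  show zmeika_2nx2n n arr2 = zmeika_2nx2n_alt n arr2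
  exact pv_main n arr2
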